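-- pv_equiv track=rewrite | github.com/AdamZhouSE/pythonHomework | Code/CodeRecords/2656/60749/257086.py | comparetwobinary
-- ===== SOURCE A (Python) =====
-- def twobinary(num):
--     res=""
--     while num>0:
--         res=str(num%2)+res
--         num=num//2
--     return res
--
-- def comparetwobinary(num1,num2):
--     if num1==num2:
--         return -1
--     num1str=twobinary(num1)
--     num2str=twobinary(num2)
--     if len(num1str)>len(num2str):
--         while len(num1str)>len(num2str):
--             num2str="0"+num2str
--     elif len(num1str)<len(num2str):
--         while len(num1str)<len(num2str):
--             num1str="0"+num1str
--     for t in range(len(num1str)-1,-1,-1):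
--         if not num1str[t]==num2str[t]:
--             return len(num1str)-t
--     return  -1
-- ===== SOURCE B (Python) =====
-- def comparetwobinary(num1, num2):
--     # Compare bits arithmetically from the LSB; A treats non-positive inputs
--     # as an empty (all-zero) bit string, so clamp them to 0.
--     if num1 == num2:
--         return -1
--     a = max(num1, 0)
--     b = max(num2, 0)
--     pos = 1
--     while a > 0 or b > 0:
--         if a % 2 != b % 2:
--             return pos
--         a //= 2
--         b //= 2
--         pos += 1
--     return -1
-- ===== Notes on version B (the rewrite author's own statement) =====
-- stated objective: simpler
-- what changed: Replaces the binary-string construction, zero-padding loops and reversed index scan with one arithmetic loop that compares the bits of the two numbers directly from the LSB (num % 2, num //= 2), returning the 1-indexed position of the first differing bit.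
import Mathlib
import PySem

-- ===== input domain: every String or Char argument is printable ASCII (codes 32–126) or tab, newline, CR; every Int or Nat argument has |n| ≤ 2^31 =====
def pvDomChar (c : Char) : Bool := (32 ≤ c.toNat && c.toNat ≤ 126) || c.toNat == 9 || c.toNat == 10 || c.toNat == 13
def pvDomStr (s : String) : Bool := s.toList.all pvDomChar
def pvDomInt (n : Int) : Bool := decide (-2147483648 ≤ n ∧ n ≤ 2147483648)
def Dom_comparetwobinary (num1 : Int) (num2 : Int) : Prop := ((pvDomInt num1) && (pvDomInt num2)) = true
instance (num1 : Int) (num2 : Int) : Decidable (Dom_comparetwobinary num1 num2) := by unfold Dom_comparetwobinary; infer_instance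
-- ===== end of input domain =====

-- B replaces A's binary-string build / zero-pad / reversed index scan by one arithmetic
-- loop over the bits from the LSB (objective: simpler).  Strings are ported as List Char.

-- ===== PORT A =====
-- while num > 0: res = str(num % 2) + res; num = num // 2
def twobinaryLoop (num : Int) (res : List Char) : List Char :=
  if num > 0 then
    twobinaryLoop (PySem.Int.floordiv num 2) (PySem.Int.toChars (PySem.Int.mod num 2) ++ res)
  else res
termination_by num.toNat
decreasing_by
  rw [PySem.Int.floordiv_eq_ediv_of_pos (by omega : (0:Int) < 2)]; omega

def twobinary (num : Int) : List Char := twobinaryLoop num []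

-- while len(s1) > len(s2): s2 = "0" + s2   (both padding loops of A have this shape)
def padLoop (s1 s2 : List Char) : List Char :=
  if s1.length > s2.length then padLoop s1 ('0' :: s2) else s2
termination_by s1.length - s2.length
decreasing_by simp; omega

-- for t in range(len(num1str)-1, -1, -1): if not num1str[t]==num2str[t]: return len-t
def scanLoop (s1 s2 : List Char) (len : Int) : List Int → Int
  | [] => -1
  | t :: ts =>
      if ¬ (PySem.List.pyGet? s1 t == PySem.List.pyGet? s2 t) then len - t
      else scanLoop s1 s2 len ts

def comparetwobinary (num1 : Int) (num2 : Int) : Int :=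
  if num1 == num2 then -1
  else
    let n1 := twobinary num1
    let n2 := twobinary num2
    let p : List Char × List Char :=
      if n1.length > n2.length then (n1, padLoop n1 n2)
      else if n1.length < n2.length then (padLoop n2 n1, n2)
      else (n1, n2)
    scanLoop p.1 p.2 (p.1.length : Int)
      (PySem.List.pyRange ((p.1.length : Int) - 1) (-1) (-1))

-- ===== PORT B =====
-- while a > 0 or b > 0: if a % 2 != b % 2: return pos; a //= 2; b //= 2; pos += 1
def altLoop (a : Int) (b : Int) (pos : Int) : Int :=
  if a > 0 ∨ b > 0 then
    if ¬ (PySem.Int.mod a 2 == PySem.Int.mod b 2) then pos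
    else altLoop (PySem.Int.floordiv a 2) (PySem.Int.floordiv b 2) (pos + 1)
  else -1
termination_by a.toNat + b.toNat
decreasing_by
  rw [PySem.Int.floordiv_eq_ediv_of_pos (by omega : (0:Int) < 2),
      PySem.Int.floordiv_eq_ediv_of_pos (by omega : (0:Int) < 2)]
  omega

def comparetwobinary_alt (num1 : Int) (num2 : Int) : Int :=
  if num1 == num2 then -1 else altLoop (max num1 0) (max num2 0) 1

-- ===== PRECONDITION & SPEC =====
def Spec_comparetwobinary (num1 : Int) (num2 : Int) (out : Int) : Prop := out = comparetwobinary_alt num1 num2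
instance (num1 : Int) (num2 : Int) (out : Int) : Decidable (Spec_comparetwobinary num1 num2 out) := by unfold Spec_comparetwobinary; infer_instance

-- ===== CLAIM (what is proved, stated in full; the proofs are below) =====
def Claim_equal_comparetwobinary : Prop := ∀ (num1 : Int) (num2 : Int), Dom_comparetwobinary num1 num2 → Spec_comparetwobinary num1 num2 (comparetwobinary num1 num2)

-- ===== LEMMAS AND PROOFS =====

-- MSB-first binary digits (what twobinary builds) and LSB-first digits (what B reads).
def bitsM (n : Nat) : List Char :=
  if n = 0 then [] else bitsM (n / 2) ++ [if n % 2 = 1 then '1' else '0']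
termination_by n
decreasing_by omega

def bitsL (n : Nat) : List Char :=
  if n = 0 then [] else (if n % 2 = 1 then '1' else '0') :: bitsL (n / 2)
termination_by n
decreasing_by omega

-- right-to-left scan of two equal-length char lists, LSB-first form
def scanR : List Char → List Char → Int → Int
  | c :: cs, d :: ds, pos => if ¬ (c == d) then pos else scanR cs ds (pos + 1)
  | _, _, _ => -1

theorem bitsL_zero : bitsL 0 = [] := by unfold bitsL; simp

theorem bitsL_pos (n : Nat) (h : n ≠ 0) :
    bitsL n = (if n % 2 = 1 then '1' else '0') :: bitsL (n / 2) := by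
  conv_lhs => rw [bitsL]
  simp [h]

theorem bitsM_zero : bitsM 0 = [] := by unfold bitsM; simp

theorem bitsM_pos (n : Nat) (h : n ≠ 0) :
    bitsM n = bitsM (n / 2) ++ [if n % 2 = 1 then '1' else '0'] := by
  conv_lhs => rw [bitsM]
  simp [h]

theorem bitsM_reverse (n : Nat) : (bitsM n).reverse = bitsL n := by
  induction n using Nat.strong_induction_on with
  | _ n ih =>
    by_cases h : n = 0
    · simp [h, bitsM_zero, bitsL_zero]
    · rw [bitsM_pos n h, bitsL_pos n h, List.reverse_append]
      simp [ih (n / 2) (by omega)]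

theorem bitsL_nil_iff (n : Nat) : bitsL n = [] ↔ n = 0 := by
  constructor
  · intro h
    by_contra h0
    rw [bitsL_pos n h0] at h
    exact List.cons_ne_nil _ _ h
  · intro h; simp [h, bitsL_zero]

theorem length_bitsL (n : Nat) : (bitsL n).length = (bitsM n).length := by
  rw [← bitsM_reverse]; simp

theorem twobinaryLoop_eq (num : Int) (res : List Char) :
    twobinaryLoop num res = bitsM num.toNat ++ res := by
  induction num, res using twobinaryLoop.induct with
  | case1 num res hpos ih =>
    rw [twobinaryLoop, if_pos hpos, ih]
    have hdiv : PySem.Int.floordiv num 2 = num / 2 :=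
      PySem.Int.floordiv_eq_ediv_of_pos (by omega)
    have hmod : PySem.Int.mod num 2 = num % 2 :=
      PySem.Int.mod_eq_emod_of_pos (by omega)
    have htn : (num / 2).toNat = num.toNat / 2 := by omega
    rw [bitsM_pos num.toNat (by omega), hdiv, hmod, htn]
    rcases Nat.mod_two_eq_zero_or_one num.toNat with h2 | h2 <;>
    · have : num % 2 = ((num.toNat % 2 : Nat) : Int) := by omega
      rw [this, h2]
      simp [show PySem.Int.toChars 0 = ['0'] from by decide,
            show PySem.Int.toChars 1 = ['1'] from by decide]
  | case2 num res hpos =>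
    rw [twobinaryLoop, if_neg hpos]
    have : num.toNat = 0 := by omega
    simp [this, bitsM_zero]

theorem padLoop_eq (s1 s2 : List Char) :
    padLoop s1 s2 = List.replicate (s1.length - s2.length) '0' ++ s2 := by
  fun_induction padLoop s1 s2 with
  | case1 t h ih =>
    rw [ih, show s1.length - t.length = (s1.length - ('0' :: t).length) + 1 by
          simp at h ⊢; omega,
        List.replicate_succ', List.append_assoc]
    simp
  | case2 t h =>
    have : s1.length - t.length = 0 := by omega
    simp [this]

theorem drop_reverse_getElem (l : List Char) (n j : Nat) (hn : l.length = n) (hj : j < n) :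
    l.reverse.drop (n - 1 - j) = l[j]'(by omega) :: l.reverse.drop (n - j) := by
  rw [List.drop_eq_getElem_cons (by simp; omega)]
  have h1 : l.reverse[n - 1 - j]'(by simp; omega) = l[j]'(by omega) := by
    rw [List.getElem_reverse]
    congr 1
    omega
  have h2 : n - 1 - j + 1 = n - j := by omega
  rw [h1, h2]

theorem scanLoop_eq (s1 s2 : List Char) (hlen : s1.length = s2.length) :
    ∀ (k : Nat), k < s1.length →
      scanLoop s1 s2 (s1.length : Int) (PySem.List.pyRange (k : Int) (-1) (-1)) =
        scanR (s1.reverse.drop (s1.length - 1 - k)) (s2.reverse.drop (s1.length - 1 - k))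
          ((s1.length : Int) - k) := by
  intro k
  induction k with
  | zero =>
    intro hk
    rw [PySem.List.pyRange_neg_one_cons (by norm_num),
        show ((0 : Nat) : Int) - 1 = -1 by norm_num,
        PySem.List.pyRange_neg_one_eq_nil (by norm_num)]
    simp only [scanLoop]
    rw [drop_reverse_getElem s1 s1.length 0 rfl hk,
        drop_reverse_getElem s2 s1.length 0 hlen.symm hk,
        show s1.reverse.drop (s1.length - 0) = [] by simp,
        show s2.reverse.drop (s1.length - 0) = [] by simp [hlen]]
    simp only [scanR]
    have g1 : PySem.List.pyGet? s1 ((0 : Nat) : Int) = some (s1[0]'hk) := by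
      rw [PySem.List.pyGet?_natCast]
      exact List.getElem?_eq_getElem hk
    have g2 : PySem.List.pyGet? s2 ((0 : Nat) : Int) = some (s2[0]'(by omega)) := by
      rw [PySem.List.pyGet?_natCast]
      exact List.getElem?_eq_getElem (by omega)
    rw [g1, g2]
    simp
  | succ k ih =>
    intro hk
    have hk' : k < s1.length := by omega
    rw [PySem.List.pyRange_neg_one_cons (by push_cast; omega),
        show ((k + 1 : Nat) : Int) - 1 = ((k : Nat) : Int) by push_cast; ring]
    simp only [scanLoop]
    rw [ih hk',
        drop_reverse_getElem s1 s1.length (k + 1) rfl hk,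
        drop_reverse_getElem s2 s1.length (k + 1) hlen.symm hk,
        show s1.length - (k + 1) = s1.length - 1 - k by omega]
    simp only [scanR]
    have hp : ((s1.length : Int) - ((k + 1 : Nat) : Int)) + 1 = (s1.length : Int) - ((k : Nat) : Int) := by
      push_cast; ring
    rw [hp]
    have g1 : PySem.List.pyGet? s1 ((k + 1 : Nat) : Int) = some (s1[k + 1]'hk) := by
      rw [PySem.List.pyGet?_natCast]
      exact List.getElem?_eq_getElem hk
    have g2 : PySem.List.pyGet? s2 ((k + 1 : Nat) : Int) = some (s2[k + 1]'(by omega)) := by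
      rw [PySem.List.pyGet?_natCast]
      exact List.getElem?_eq_getElem (by omega)
    rw [g1, g2]
    simp

theorem padded_cons (a L : Nat) (h : (bitsL a).length ≤ L + 1) :
    bitsL a ++ List.replicate (L + 1 - (bitsL a).length) '0' =
      (if a % 2 = 1 then '1' else '0') ::
        (bitsL (a / 2) ++ List.replicate (L - (bitsL (a / 2)).length) '0') := by
  by_cases h0 : a = 0
  · subst h0
    simp [bitsL_zero, List.replicate_succ]
  · rw [bitsL_pos a h0]
    simp only [List.length_cons, List.cons_append]
    congr 3
    omega

theorem bridge (L : Nat) : ∀ (a b : Nat) (pos : Int),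
    (bitsL a).length ≤ L → (bitsL b).length ≤ L →
    scanR (bitsL a ++ List.replicate (L - (bitsL a).length) '0')
          (bitsL b ++ List.replicate (L - (bitsL b).length) '0') pos =
      altLoop (a : Int) (b : Int) pos := by
  induction L with
  | zero =>
    intro a b pos ha hb
    have ha0 : a = 0 := (bitsL_nil_iff a).mp (List.eq_nil_of_length_eq_zero (by omega))
    have hb0 : b = 0 := (bitsL_nil_iff b).mp (List.eq_nil_of_length_eq_zero (by omega))
    subst ha0; subst hb0
    rw [altLoop]
    norm_num [bitsL_zero, scanR]
  | succ L ih =>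
    intro a b pos ha hb
    have hlena : (bitsL (a / 2)).length ≤ L := by
      by_cases h0 : a = 0
      · simp [h0, bitsL_zero]
      · rw [bitsL_pos a h0] at ha; simp at ha; omega
    have hlenb : (bitsL (b / 2)).length ≤ L := by
      by_cases h0 : b = 0
      · simp [h0, bitsL_zero]
      · rw [bitsL_pos b h0] at hb; simp at hb; omega
    rw [padded_cons a L ha, padded_cons b L hb]
    simp only [scanR]
    rw [ih (a / 2) (b / 2) (pos + 1) hlena hlenb]
    have hma : PySem.Int.mod (a : Int) 2 = ((a % 2 : Nat) : Int) := by
      exact_mod_cast PySem.Int.mod_natCast a 2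
    have hmb : PySem.Int.mod (b : Int) 2 = ((b % 2 : Nat) : Int) := by
      exact_mod_cast PySem.Int.mod_natCast b 2
    have hfa : PySem.Int.floordiv (a : Int) 2 = ((a / 2 : Nat) : Int) := by
      exact_mod_cast PySem.Int.floordiv_natCast a 2
    have hfb : PySem.Int.floordiv (b : Int) 2 = ((b / 2 : Nat) : Int) := by
      exact_mod_cast PySem.Int.floordiv_natCast b 2
    conv_rhs => rw [altLoop]
    rw [hma, hmb, hfa, hfb]
    by_cases hab : a % 2 = b % 2
    · by_cases hz : a = 0 ∧ b = 0
      · obtain ⟨ha0, hb0⟩ := hz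
        subst ha0; subst hb0
        norm_num
        rw [altLoop]
        norm_num
      · have hpos : (a : Int) > 0 ∨ (b : Int) > 0 := by
          rcases Nat.eq_zero_or_pos a with h1 | h1
          · right
            have : b ≠ 0 := fun hb' => hz ⟨h1, hb'⟩
            omega
          · left; omega
        rw [if_pos hpos]
        have hd : ((if a % 2 = 1 then '1' else '0') == (if b % 2 = 1 then '1' else '0')) = true := by
          rw [hab]
          split <;> rfl
        simp [hab]
    · have hmne : a % 2 ≠ b % 2 := hab
      have hpos : (a : Int) > 0 ∨ (b : Int) > 0 := by omega
      rw [if_pos hpos]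
      have hd : ((if a % 2 = 1 then '1' else '0') == (if b % 2 = 1 then '1' else '0')) = false := by
        rcases Nat.mod_two_eq_zero_or_one a with h1 | h1 <;>
          rcases Nat.mod_two_eq_zero_or_one b with h2 | h2 <;>
            simp_all
      simp [hd]
      intro h
      exfalso
      omega

theorem assemble (m n L : Nat) (t1 t2 : List Char)
    (hL1 : t1.length = L) (hL2 : t2.length = L)
    (h1 : t1.reverse = bitsL m ++ List.replicate (L - (bitsL m).length) '0')
    (h2 : t2.reverse = bitsL n ++ List.replicate (L - (bitsL n).length) '0')
    (hm : (bitsL m).length ≤ L) (hn : (bitsL n).length ≤ L) :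
    scanLoop t1 t2 (t1.length : Int) (PySem.List.pyRange ((t1.length : Int) - 1) (-1) (-1)) =
      altLoop (m : Int) (n : Int) 1 := by
  by_cases hL0 : L = 0
  · subst hL0
    have hm0 : m = 0 := (bitsL_nil_iff m).mp (List.eq_nil_of_length_eq_zero (by omega))
    have hn0 : n = 0 := (bitsL_nil_iff n).mp (List.eq_nil_of_length_eq_zero (by omega))
    subst hm0; subst hn0
    rw [PySem.List.pyRange_neg_one_eq_nil (by rw [hL1]; norm_num), altLoop]
    norm_num [scanLoop]
  · have hL : 1 ≤ L := by omega
    rw [show (t1.length : Int) - 1 = ((L - 1 : Nat) : Int) by rw [hL1]; omega,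
        scanLoop_eq t1 t2 (hL1.trans hL2.symm) (L - 1) (by omega), hL1,
        show L - 1 - (L - 1) = 0 by omega, List.drop_zero, List.drop_zero, h1, h2,
        show (L : Int) - ((L - 1 : Nat) : Int) = 1 by omega]
    exact bridge L m n 1 hm hn

-- ===== VERDICT (by name: the statement is the Claim_ definition above) =====
theorem comparetwobinary_spec : Claim_equal_comparetwobinary := by
  unfold Claim_equal_comparetwobinary
  intro num1 num2 _
  unfold Spec_comparetwobinary comparetwobinary comparetwobinary_alt
  by_cases heq : num1 = num2
  · simp [heq]
  · have hbeq : (num1 == num2) = false := by simp [heq]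
    rw [hbeq]
    simp only [Bool.false_eq_true, if_false]
    have hmax1 : max num1 0 = ((num1.toNat : Nat) : Int) := by
      rw [Int.max_def]; split <;> omega
    have hmax2 : max num2 0 = ((num2.toNat : Nat) : Int) := by
      rw [Int.max_def]; split <;> omega
    have ht1 : twobinary num1 = bitsM num1.toNat := by
      unfold twobinary; rw [twobinaryLoop_eq]; simp
    have ht2 : twobinary num2 = bitsM num2.toNat := by
      unfold twobinary; rw [twobinaryLoop_eq]; simp
    rw [hmax1, hmax2]
    simp only [ht1, ht2]
    set m := num1.toNat with hm
    set n := num2.toNat with hn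
    have hlb1 : (bitsL m).length = (bitsM m).length := length_bitsL m
    have hlb2 : (bitsL n).length = (bitsM n).length := length_bitsL n
    rcases lt_trichotomy (bitsM m).length (bitsM n).length with hlt | heq2 | hgt
    · rw [if_neg (by omega), if_pos hlt]
      refine assemble m n (bitsM n).length _ _ ?_ rfl ?_ ?_ (by omega) (by omega)
      · rw [padLoop_eq]; simp; omega
      · rw [padLoop_eq, List.reverse_append, List.reverse_replicate, bitsM_reverse, hlb1]
      · rw [bitsM_reverse, hlb2]
        simp
    · rw [if_neg (by omega), if_neg (by omega)]
      refine assemble m n (bitsM n).length _ _ (by omega) rfl ?_ ?_ (by omega) (by omega)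
      · rw [bitsM_reverse, hlb1, heq2]
        simp
      · rw [bitsM_reverse, hlb2]
        simp
    · rw [if_pos hgt]
      refine assemble m n (bitsM m).length _ _ rfl ?_ ?_ ?_ (by omega) (by omega)
      · rw [padLoop_eq]; simp; omega
      · rw [bitsM_reverse, hlb1]
        simp
      · rw [padLoop_eq, List.reverse_append, List.reverse_replicate, bitsM_reverse, hlb2]
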